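-- pv_equiv track=rewrite | github.com/fakad/video-sum-mcp | video-sum-mcp/core/knowledge_graph/formatter.py | _format_content_structure
-- ===== SOURCE A (Python) =====
-- from typing import Dict, Any, List
--
-- def _format_content_structure(structure: Dict[str, Any]) -> str:
--     """格式化内容结构"""
--     content = "### 内容结构\n\n"
--
--     # 主要观点
--     main_points = structure.get('main_points', [])
--     if main_points:
--         content += "#### 主要观点\n\n"
--         for point in main_points:
--             content += f"- {point}\n"
--         content += "\n"
--
--     # 支撑细节
--     supporting_details = structure.get('supporting_details', [])
--     if supporting_details:
--         content += "#### 支撑细节\n\n"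
--         for detail in supporting_details:
--             content += f"- {detail}\n"
--         content += "\n"
--
--     # 示例说明
--     examples = structure.get('examples', [])
--     if examples:
--         content += "#### 示例说明\n\n"
--         for example in examples:
--             content += f"- {example}\n"
--         content += "\n"
--
--     return content
-- ===== SOURCE B (Python) =====
-- def _format_content_structure(structure):
--     """格式化内容结构"""
--     def section_lines(sections):
--         if not sections:
--             return []
--         key, header = sections[0]
--         items = structure.get(key, [])
--         head = (["#### " + header, ""]
--                 + ["- " + it for it in items]
--                 + [""]) if items else []
--         return head + section_lines(sections[1:])
--
--     lines = ["### 内容结构", ""] + section_lines(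
--         [('main_points', '主要观点'),
--          ('supporting_details', '支撑细节'),
--          ('examples', '示例说明')])
--     return "\n".join(lines) + "\n"
-- ===== Notes on version B (the rewrite author's own statement) =====
-- stated objective: alternative
-- what changed: B builds the document as a flat list of LINES (no embedded newlines) produced by a recursive descent over section descriptors, then renders once with '\n'.join(lines) + '\n'; A imperatively concatenates pre-terminated string fragments section by section.
import Mathlib
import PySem

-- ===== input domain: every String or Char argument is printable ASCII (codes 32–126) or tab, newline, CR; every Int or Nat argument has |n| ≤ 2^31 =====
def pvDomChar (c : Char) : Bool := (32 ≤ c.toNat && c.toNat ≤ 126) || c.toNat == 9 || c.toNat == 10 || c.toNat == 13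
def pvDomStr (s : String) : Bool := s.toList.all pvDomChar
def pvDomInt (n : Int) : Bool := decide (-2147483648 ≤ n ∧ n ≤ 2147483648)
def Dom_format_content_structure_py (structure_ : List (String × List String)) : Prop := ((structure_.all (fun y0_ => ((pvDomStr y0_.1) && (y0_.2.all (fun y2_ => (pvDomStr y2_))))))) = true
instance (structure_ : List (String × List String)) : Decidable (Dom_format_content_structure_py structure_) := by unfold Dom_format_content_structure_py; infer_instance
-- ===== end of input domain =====

-- B rebuilds the document as a flat list of lines via recursive descent over section descriptors
-- and renders once with a single join; proved equal to A's fragment-concatenation (alternative).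
-- ===== PORT A =====
def format_content_structure_py (structure_ : List (String × List String)) : String :=
  let content := "### 内容结构\n\n"
  let main_points := PySem.Dict.getD (PySem.Dict.mk structure_) "main_points" []
  let content := if main_points ≠ [] then
      let content := content ++ "#### 主要观点\n\n"
      let content := main_points.foldl (fun c p => c ++ "- " ++ p ++ "\n") content
      content ++ "\n"
    else content
  let supporting_details := PySem.Dict.getD (PySem.Dict.mk structure_) "supporting_details" []
  let content := if supporting_details ≠ [] then
      let content := content ++ "#### 支撑细节\n\n"
      let content := supporting_details.foldl (fun c d => c ++ "- " ++ d ++ "\n") content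
      content ++ "\n"
    else content
  let examples := PySem.Dict.getD (PySem.Dict.mk structure_) "examples" []
  let content := if examples ≠ [] then
      let content := content ++ "#### 示例说明\n\n"
      let content := examples.foldl (fun c e => c ++ "- " ++ e ++ "\n") content
      content ++ "\n"
    else content
  content

-- ===== PORT B =====
-- B's inner recursive helper section_lines(sections)
def pvSectionLines (structure_ : List (String × List String)) :
    List (String × String) → List String
  | [] => []
  | kh :: rest =>
    let items := PySem.Dict.getD (PySem.Dict.mk structure_) kh.1 []
    let head := if items ≠ [] then
        ["#### " ++ kh.2, ""] ++ items.map (fun it => "- " ++ it) ++ [""]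
      else []
    head ++ pvSectionLines structure_ rest

def format_content_structure_py_alt (structure_ : List (String × List String)) : String :=
  let lines := ["### 内容结构", ""] ++ pvSectionLines structure_
    [("main_points", "主要观点"), ("supporting_details", "支撑细节"), ("examples", "示例说明")]
  PySem.Str.join "\n" lines ++ "\n"

-- ===== PRECONDITION & SPEC =====
def Spec_format_content_structure_py (structure_ : List (String × List String)) (out : String) : Prop := out = format_content_structure_py_alt structure_
instance (structure_ : List (String × List String)) (out : String) : Decidable (Spec_format_content_structure_py structure_ out) := by unfold Spec_format_content_structure_py; infer_instance

-- ===== CLAIM =====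
def Claim_equal_format_content_structure_py : Prop := ∀ (structure_ : List (String × List String)), Dom_format_content_structure_py structure_ → Spec_format_content_structure_py structure_ (format_content_structure_py structure_)

-- ===== LEMMAS AND PROOFS =====
theorem foldl_append_pull (L : List String) (a b : String) :
    L.foldl (fun r s => r ++ s) (a ++ b) = a ++ L.foldl (fun r s => r ++ s) b := by
  induction L generalizing b with
  | nil => rfl
  | cons x t ih => simp [List.foldl, String.append_assoc, ih]

theorem str_join_cons_cons (x y : String) (t : List String) :
    PySem.Str.join "\n" (x :: y :: t) = x ++ "\n" ++ PySem.Str.join "\n" (y :: t) := by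
  apply String.toList_inj.mp
  simp [PySem.Str.toList_join, PySem.Chars.join_cons_cons]

theorem join_newline (L : List String) (h : L ≠ []) :
    PySem.Str.join "\n" L ++ "\n" = String.join (L.map (fun s => s ++ "\n")) := by
  induction L with
  | nil => simp at h
  | cons x t ih =>
    cases t with
    | nil =>
      apply String.toList_inj.mp
      simp [PySem.Str.toList_join, PySem.Chars.join_singleton, String.join]
    | cons y t' =>
      rw [str_join_cons_cons]
      simp only [List.map_cons, String.join, List.foldl]
      rw [String.append_assoc, ih (by simp)]
      simp [String.join, String.append_assoc, foldl_append_pull]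

theorem foldl_dash (xs : List String) (c : String) :
    xs.foldl (fun c p => c ++ ("- " ++ (p ++ "\n"))) c
      = (xs.map ((fun s => s ++ "\n") ∘ fun it => "- " ++ it)).foldl (fun r s => r ++ s) c := by
  induction xs generalizing c with
  | nil => rfl
  | cons x t ih => simp [ih, String.append_assoc]

-- ===== VERDICT =====
theorem format_content_structure_py_spec : Claim_equal_format_content_structure_py := by
  intro structure_ _
  unfold Spec_format_content_structure_py format_content_structure_py format_content_structure_py_alt
  rw [join_newline _ (by simp)]
  simp only [pvSectionLines]
  by_cases h1 : PySem.Dict.getD (PySem.Dict.mk structure_) "main_points" ([] : List String) = [] <;>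
    by_cases h2 : PySem.Dict.getD (PySem.Dict.mk structure_) "supporting_details" ([] : List String) = [] <;>
      by_cases h3 : PySem.Dict.getD (PySem.Dict.mk structure_) "examples" ([] : List String) = [] <;>
        simp [h1, h2, h3, String.join, String.append_assoc, List.map_append, ← foldl_dash]
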